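-- pv_equiv track=rewrite | github.com/dmitry-s-danilov/geekbrains_python_basics | lesson_4/task/problem_4.py | filter_1_duplicate
-- ===== SOURCE A (Python) =====
-- def filter_1_duplicate(x):
--     y = []
--     for i in range(len(x)):
--         for j in range(len(x)):
--             if x[i] == x[j]:
--                 if j < i:
--                     break
--                 elif j == i:
--                     continue
--                 else:
--                     y.append(x[i])
--                     break
--     return y
-- ===== SOURCE B (Python) =====
-- def filter_1_duplicate(x):
--     counts = {}
--     for v in x:
--         counts[v] = counts.get(v, 0) + 1
--     y = []
--     emitted = set()
--     for v in x:
--         if counts[v] > 1 and v not in emitted: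
--             y.append(v)
--             emitted.add(v)
--     return y
-- ===== Notes on version B (the rewrite author's own statement) =====
-- stated objective: faster
-- what changed: Replaces A's per-element rescan of the whole list (nested index loops with break/continue) by one pass building a frequency dict plus one flat pass with an emitted-set, appending a value exactly when its count exceeds 1 and it was not emitted yet.
import Mathlib
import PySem

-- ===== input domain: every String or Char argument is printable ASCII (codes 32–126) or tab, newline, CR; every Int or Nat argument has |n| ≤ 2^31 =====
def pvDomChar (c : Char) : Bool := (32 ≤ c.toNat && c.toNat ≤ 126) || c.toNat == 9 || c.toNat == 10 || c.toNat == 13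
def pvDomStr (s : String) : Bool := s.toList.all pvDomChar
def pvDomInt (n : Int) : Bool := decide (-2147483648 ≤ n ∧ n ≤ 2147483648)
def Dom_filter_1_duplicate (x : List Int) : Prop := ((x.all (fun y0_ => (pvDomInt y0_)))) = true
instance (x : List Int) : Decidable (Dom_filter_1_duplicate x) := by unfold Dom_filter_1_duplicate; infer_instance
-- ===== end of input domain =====

-- B replaces A's nested index rescans by one frequency-dict pass plus one flat pass with an
-- emitted-set (objective: faster; same return value).

-- ===== PORT A =====
-- A's inner 'for j in range(len(x))' loop, over the list of remaining j values; returns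
-- whether x[i] gets appended (break-after-append = true, break-before-i / loop end = false).
def aInner (x : List Int) (i : Nat) : List Nat → Bool
  | [] => false
  | j :: rest =>
    if x.getD i 0 = x.getD j 0 then      -- indices from range(len(x)) are in bounds, so getD is exact
      if j < i then false
      else if j = i then aInner x i rest
      else true
    else aInner x i rest

def filter_1_duplicate (x : List Int) : List Int :=
  (List.range x.length).foldl
    (fun y i => if aInner x i (List.range x.length) then y ++ [x.getD i 0] else y) []

-- ===== PORT B =====
def filter_1_duplicate_alt (x : List Int) : List Int :=
  let counts : PySem.Dict Int Int :=
    x.foldl (fun d v => d.insert v (d.getD v 0 + 1)) PySem.Dict.empty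
  (x.foldl
    (fun (st : PySem.Set Int × List Int) v =>
      if 1 < counts.getD v 0 ∧ PySem.Set.contains st.1 v = false then
        (PySem.Set.add st.1 v, st.2 ++ [v])
      else st)
    (PySem.Set.empty, [])).2

-- ===== PRECONDITION & SPEC =====
def Spec_filter_1_duplicate (x : List Int) (out : List Int) : Prop := out = filter_1_duplicate_alt x
instance (x : List Int) (out : List Int) : Decidable (Spec_filter_1_duplicate x out) := by unfold Spec_filter_1_duplicate; infer_instance

-- ===== CLAIM (what is proved, stated in full; the proofs are below) =====
def Claim_equal_filter_1_duplicate : Prop := ∀ (x : List Int), Dom_filter_1_duplicate x → Spec_filter_1_duplicate x (filter_1_duplicate x)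

-- ===== LEMMAS AND PROOFS =====

-- reference: first occurrences (w.r.t. already-seen prefix) of values that also occur later
def refAux : List Int → List Int → List Int
  | _, [] => []
  | pre, v :: post =>
    (if v ∉ pre ∧ v ∈ post then [v] else []) ++ refAux (pre ++ [v]) post

theorem aInner_append_lt (x : List Int) (i : Nat) (js₁ js₂ : List Nat)
    (h : ∀ j ∈ js₁, j < i) :
    aInner x i (js₁ ++ js₂) =
      if ∃ j ∈ js₁, x.getD i 0 = x.getD j 0 then false else aInner x i js₂ := by
  induction js₁ with
  | nil => simp
  | cons j rest ih =>
    have hj : j < i := h j (List.mem_cons_self ..)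
    rw [List.cons_append]
    show (if x.getD i 0 = x.getD j 0 then
            if j < i then false else if j = i then aInner x i (rest ++ js₂) else true
          else aInner x i (rest ++ js₂)) = _
    by_cases hm : x.getD i 0 = x.getD j 0
    · rw [if_pos hm, if_pos hj, if_pos ⟨j, List.mem_cons_self .., hm⟩]
    · rw [if_neg hm, ih (fun k hk => h k (List.mem_cons_of_mem _ hk))]
      have hiff : (∃ k ∈ rest, x.getD i 0 = x.getD k 0) ↔
          (∃ k ∈ j :: rest, x.getD i 0 = x.getD k 0) := by
        constructor
        · rintro ⟨k, hk, hkm⟩; exact ⟨k, List.mem_cons_of_mem _ hk, hkm⟩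
        · rintro ⟨k, hk, hkm⟩
          rcases List.mem_cons.mp hk with rfl | hk
          · exact absurd hkm hm
          · exact ⟨k, hk, hkm⟩
      exact if_congr hiff rfl rfl

theorem aInner_self (x : List Int) (i : Nat) (js : List Nat) :
    aInner x i (i :: js) = aInner x i js := by
  show (if x.getD i 0 = x.getD i 0 then
          if i < i then false else if i = i then aInner x i js else true
        else aInner x i js) = _
  rw [if_pos rfl, if_neg (Nat.lt_irrefl i), if_pos rfl]

theorem aInner_gt (x : List Int) (i : Nat) (js : List Nat)
    (h : ∀ j ∈ js, i < j) :
    aInner x i js = decide (∃ j ∈ js, x.getD i 0 = x.getD j 0) := by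
  induction js with
  | nil => simp [aInner]
  | cons j rest ih =>
    have hj : i < j := h j (List.mem_cons_self ..)
    show (if x.getD i 0 = x.getD j 0 then
            if j < i then false else if j = i then aInner x i rest else true
          else aInner x i rest) = _
    by_cases hm : x.getD i 0 = x.getD j 0
    · rw [if_pos hm, if_neg (Nat.lt_asymm hj), if_neg (by omega : ¬ j = i)]
      exact (decide_eq_true ⟨j, List.mem_cons_self .., hm⟩).symm
    · rw [if_neg hm, ih (fun k hk => h k (List.mem_cons_of_mem _ hk))]
      have hiff : (∃ k ∈ j :: rest, x.getD i 0 = x.getD k 0) ↔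
          (∃ k ∈ rest, x.getD i 0 = x.getD k 0) := by
        constructor
        · rintro ⟨k, hk, hkm⟩
          rcases List.mem_cons.mp hk with rfl | hk
          · exact absurd hkm hm
          · exact ⟨k, hk, hkm⟩
        · rintro ⟨k, hk, hkm⟩; exact ⟨k, List.mem_cons_of_mem _ hk, hkm⟩
      simp only [hiff]

theorem getD_append_left {l l' : List Int} {j : Nat} (h : j < l.length) :
    (l ++ l').getD j 0 = l.getD j 0 := by
  simp [List.getD, List.getElem?_append_left h]

theorem getD_mid (pre post : List Int) (v : Int) :
    (pre ++ v :: post).getD pre.length 0 = v := by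
  simp [List.getD]

theorem getD_right (pre post : List Int) (v : Int) (k : Nat) (_hk : k < post.length) :
    (pre ++ v :: post).getD (pre.length + 1 + k) 0 = post.getD k 0 := by
  have h1 : pre.length ≤ pre.length + 1 + k := by omega
  simp only [List.getD, List.getElem?_append_right h1]
  have h2 : pre.length + 1 + k - pre.length = k + 1 := by omega
  simp [h2]

theorem mem_iff_exists_getD (l : List Int) (v : Int) :
    v ∈ l ↔ ∃ j < l.length, l.getD j 0 = v := by
  constructor
  · intro hv
    obtain ⟨j, hj, hjv⟩ := List.mem_iff_getElem.mp hv
    exact ⟨j, hj, by simp [List.getD, List.getElem?_eq_getElem hj, hjv]⟩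
  · rintro ⟨j, hj, hjv⟩
    rw [← hjv]
    simp only [List.getD, List.getElem?_eq_getElem hj, Option.getD_some]
    exact List.getElem_mem hj

-- characterisation of A's inner loop at the split x = pre ++ v :: post
theorem aInner_char (pre post : List Int) (v : Int) :
    aInner (pre ++ v :: post) pre.length (List.range (pre ++ v :: post).length) =
      decide (v ∉ pre ∧ v ∈ post) := by
  set x := pre ++ v :: post with hx
  have hvi : x.getD pre.length 0 = v := getD_mid pre post v
  have hlen : x.length = (pre.length + 1) + post.length := by
    simp [hx]; omega
  have hsplit : List.range x.length =
      List.range pre.length ++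
        (pre.length :: (List.range post.length).map (fun k => pre.length + 1 + k)) := by
    rw [hlen, List.range_add, List.range_succ, List.append_assoc, List.singleton_append]
  rw [hsplit,
    aInner_append_lt x pre.length _ _ (fun j hj => List.mem_range.mp hj),
    aInner_self,
    aInner_gt x pre.length _ (by
      intro j hj
      obtain ⟨k, _, rfl⟩ := List.mem_map.mp hj
      omega)]
  have hpre : (∃ j ∈ List.range pre.length, x.getD pre.length 0 = x.getD j 0) ↔ v ∈ pre := by
    rw [mem_iff_exists_getD]
    constructor
    · rintro ⟨j, hj, hm⟩
      have hj' : j < pre.length := List.mem_range.mp hj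
      refine ⟨j, hj', ?_⟩
      rw [hx] at hm; rw [getD_append_left hj'] at hm
      rw [← hm, hvi]
    · rintro ⟨j, hj, hjv⟩
      refine ⟨j, List.mem_range.mpr hj, ?_⟩
      rw [hvi, hx, getD_append_left hj, hjv]
  have hpost : (∃ j ∈ (List.range post.length).map (fun k => pre.length + 1 + k),
      x.getD pre.length 0 = x.getD j 0) ↔ v ∈ post := by
    rw [mem_iff_exists_getD]
    constructor
    · rintro ⟨j, hj, hm⟩
      obtain ⟨k, hk, rfl⟩ := List.mem_map.mp hj
      have hk' : k < post.length := List.mem_range.mp hk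
      refine ⟨k, hk', ?_⟩
      rw [hx] at hm; rw [getD_right pre post v k hk'] at hm
      rw [← hm, hvi]
    · rintro ⟨k, hk, hkv⟩
      refine ⟨pre.length + 1 + k, List.mem_map.mpr ⟨k, List.mem_range.mpr hk, rfl⟩, ?_⟩
      rw [hvi, hx, getD_right pre post v k hk, hkv]
  by_cases hvp : v ∈ pre
  · rw [if_pos (hpre.mpr hvp)]
    have hno : ¬ (v ∉ pre ∧ v ∈ post) := fun h => h.1 hvp
    simp [hno]
  · rw [if_neg (fun h => hvp (hpre.mp h))]
    refine (decide_eq_decide).mpr ?_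
    rw [hpost]
    exact ⟨fun h => ⟨hvp, h⟩, fun h => h.2⟩

theorem flatMap_if (p : Nat → Bool) (f : Nat → Int) (l : List Nat) :
    l.flatMap (fun i => if p i then [f i] else []) = (l.filter p).map f := by
  induction l with
  | nil => simp
  | cons a l ih =>
    by_cases h : p a <;> simp [h, ih]

theorem A_flat (x : List Int) :
    filter_1_duplicate x =
      (List.range x.length).flatMap
        (fun i => if aInner x i (List.range x.length) then [x.getD i 0] else []) := by
  unfold filter_1_duplicate
  rw [PySem.List.foldl_append_if (fun i => aInner x i (List.range x.length))
        (fun i => x.getD i 0) (List.range x.length) [],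
      List.nil_append, flatMap_if]

theorem A_ref (x : List Int) : ∀ (post pre : List Int), x = pre ++ post →
    ((List.range post.length).map (fun k => pre.length + k)).flatMap
        (fun i => if aInner x i (List.range x.length) then [x.getD i 0] else []) =
      refAux pre post := by
  intro post
  induction post with
  | nil => intro pre _; simp [refAux]
  | cons v post' ih =>
    intro pre hxpre
    rw [List.length_cons, List.range_succ_eq_map]
    simp only [List.map_cons, List.map_map, List.flatMap_cons]
    have hmap : ((List.range post'.length).map ((fun k => pre.length + k) ∘ (fun k => k + 1)))
        = (List.range post'.length).map (fun k => (pre ++ [v]).length + k) := by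
      apply List.map_congr_left
      intro k _
      simp [Function.comp]
      omega
    rw [hmap, ih (pre ++ [v]) (by rw [hxpre]; simp)]
    simp only [Nat.add_zero]
    have hchar : aInner x pre.length (List.range x.length) = decide (v ∉ pre ∧ v ∈ post') := by
      rw [hxpre]; exact aInner_char pre post' v
    have hget : x.getD pre.length 0 = v := by rw [hxpre]; exact getD_mid pre post' v
    rw [hchar, hget]
    by_cases hcond : v ∉ pre ∧ v ∈ post' <;> simp [refAux, hcond]

theorem A_eq_ref (x : List Int) : filter_1_duplicate x = refAux [] x := by
  rw [A_flat]
  have := A_ref x x [] rfl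
  simpa using this

theorem set_contains_iff (s : PySem.Set Int) (w : Int) :
    PySem.Set.contains s w = true ↔ w ∈ s := by
  simp [PySem.Set.contains]

theorem B_loop (x : List Int) (d : PySem.Dict Int Int)
    (hd : ∀ v, d.getD v 0 = (List.count v x : Int)) :
    ∀ (post pre : List Int) (emitted : PySem.Set Int) (y : List Int),
      x = pre ++ post →
      (∀ w : Int, PySem.Set.contains emitted w = true ↔ (w ∈ pre ∧ 1 < List.count w x)) →
      (post.foldl
        (fun (st : PySem.Set Int × List Int) v =>
          if 1 < d.getD v 0 ∧ PySem.Set.contains st.1 v = false then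
            (PySem.Set.add st.1 v, st.2 ++ [v])
          else st)
        (emitted, y)).2 = y ++ refAux pre post := by
  intro post
  induction post with
  | nil => intro pre emitted y _ _; simp [refAux]
  | cons v post' ih =>
    intro pre emitted y hxpre hinv
    have hcount : List.count v x = List.count v pre + (List.count v post' + 1) := by
      rw [hxpre]; simp [List.count_append]
    rw [List.foldl_cons]
    by_cases hvp : v ∈ pre
    · -- v seen before: its count is ≥ 2, so it is already in emitted; nothing happens
      have hc2 : 1 < List.count v x := by
        have := List.count_pos_iff.mpr hvp
        omega
      have hce : PySem.Set.contains emitted v = true := (hinv v).mpr ⟨hvp, hc2⟩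
      rw [if_neg (by rw [hce]; rintro ⟨-, h⟩; exact absurd h (by simp))]
      have hinv' : ∀ w : Int, PySem.Set.contains emitted w = true ↔
          (w ∈ pre ++ [v] ∧ 1 < List.count w x) := by
        intro w
        rw [hinv w]
        constructor
        · rintro ⟨hw, hcw⟩; exact ⟨List.mem_append_left _ hw, hcw⟩
        · rintro ⟨hw, hcw⟩
          rcases List.mem_append.mp hw with hw | hw
          · exact ⟨hw, hcw⟩
          · rw [List.mem_singleton.mp hw]; exact ⟨hvp, hc2⟩
      rw [ih (pre ++ [v]) emitted y (by rw [hxpre]; simp) hinv']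
      show _ = y ++ ((if v ∉ pre ∧ v ∈ post' then [v] else []) ++ refAux (pre ++ [v]) post')
      rw [if_neg (by rintro ⟨h, -⟩; exact h hvp)]
      rfl
    · -- first occurrence of v
      have hce : PySem.Set.contains emitted v = false := by
        rcases h : PySem.Set.contains emitted v with _ | _
        · rfl
        · exact absurd ((hinv v).mp h).1 hvp
      have hpre0 : List.count v pre = 0 := List.count_eq_zero.mpr hvp
      by_cases hvq : v ∈ post'
      · -- duplicate later: emit
        have hc2 : 1 < List.count v x := by
          have := List.count_pos_iff.mpr hvq
          omega
        rw [if_pos ⟨by rw [hd v]; exact_mod_cast hc2, hce⟩]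
        have hinv' : ∀ w : Int, PySem.Set.contains (PySem.Set.add emitted v) w = true ↔
            (w ∈ pre ++ [v] ∧ 1 < List.count w x) := by
          intro w
          rw [set_contains_iff, PySem.Set.mem_add]
          constructor
          · rintro (hw | rfl)
            · obtain ⟨h1, h2⟩ := (hinv w).mp ((set_contains_iff emitted w).mpr hw)
              exact ⟨List.mem_append_left _ h1, h2⟩
            · exact ⟨List.mem_append_right _ (List.mem_singleton_self _), hc2⟩
          · rintro ⟨hw, hcw⟩
            rcases List.mem_append.mp hw with hw | hw
            · exact Or.inl ((set_contains_iff emitted w).mp ((hinv w).mpr ⟨hw, hcw⟩))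
            · exact Or.inr (List.mem_singleton.mp hw)
        rw [ih (pre ++ [v]) (PySem.Set.add emitted v) (y ++ [v]) (by rw [hxpre]; simp) hinv']
        show _ = y ++ ((if v ∉ pre ∧ v ∈ post' then [v] else []) ++ refAux (pre ++ [v]) post')
        rw [if_pos ⟨hvp, hvq⟩, List.append_assoc]
      · -- count v x = 1: skip
        have hc1 : List.count v x = 1 := by
          have := List.count_eq_zero.mpr hvq
          omega
        rw [if_neg (by
          rintro ⟨h1, -⟩
          rw [hd v, hc1] at h1
          exact absurd h1 (by norm_num))]
        have hinv' : ∀ w : Int, PySem.Set.contains emitted w = true ↔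
            (w ∈ pre ++ [v] ∧ 1 < List.count w x) := by
          intro w
          rw [hinv w]
          constructor
          · rintro ⟨hw, hcw⟩; exact ⟨List.mem_append_left _ hw, hcw⟩
          · rintro ⟨hw, hcw⟩
            rcases List.mem_append.mp hw with hw | hw
            · exact ⟨hw, hcw⟩
            · rw [List.mem_singleton.mp hw] at hcw
              rw [hc1] at hcw
              exact absurd hcw (by norm_num)
        rw [ih (pre ++ [v]) emitted y (by rw [hxpre]; simp) hinv']
        show _ = y ++ ((if v ∉ pre ∧ v ∈ post' then [v] else []) ++ refAux (pre ++ [v]) post')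
        rw [if_neg (by rintro ⟨-, h⟩; exact hvq h)]
        rfl

theorem B_eq_ref (x : List Int) : filter_1_duplicate_alt x = refAux [] x := by
  have hd : ∀ v, (x.foldl (fun d v => d.insert v (d.getD v 0 + 1)) PySem.Dict.empty).getD v 0
      = (List.count v x : Int) := by
    intro v
    rw [PySem.Dict.foldl_insert_getD_add_one_eq_counter, PySem.Dict.getD_counter]
  have h := B_loop x _ hd x [] PySem.Set.empty [] rfl
    (by intro w; simp [PySem.Set.contains, PySem.Set.empty])
  simpa [filter_1_duplicate_alt] using h

-- ===== VERDICT (by name: the statement is the Claim_ definition above) =====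
theorem filter_1_duplicate_spec : Claim_equal_filter_1_duplicate := by
  intro x _
  unfold Spec_filter_1_duplicate
  rw [A_eq_ref, B_eq_ref]
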